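-- pv_equiv track=rewrite | github.com/mcgillij/dorf | client/bot/leveling.py | get_title_for_level
-- ===== SOURCE A (Python) =====
-- def get_title_for_level(level):
--     titles = [
--         (0, "Wanderer"),
--         (5, "Noob"),
--         (10, "Scrub"),
--         (15, "Squire"),
--         (20, "Knight"),
--         (25, "Spellblade"),
--         (30, "Berzerker"),
--         (35, "Paladin"),
--         (40, "Archmage"),
--         (45, "Dragonlord"),
--         (50, "Einherjar"),
--     ]
--     for lvl, title in reversed(titles):
--         if level >= lvl:
--             return title
--     return "Wanderer"
-- ===== SOURCE B (Python) =====
-- def get_title_for_level(level):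
--     names = ["Wanderer", "Noob", "Scrub", "Squire", "Knight", "Spellblade",
--              "Berzerker", "Paladin", "Archmage", "Dragonlord", "Einherjar"]
--     idx = max(0, min(int(level // 5), 10))
--     return names[idx]
-- ===== Notes on version B (the rewrite author's own statement) =====
-- stated objective: simpler
-- what changed: Replaces the scan over reversed (threshold, title) pairs with a closed-form arithmetic index into a plain name list: idx = clamp(level // 5, 0, 10).
import Mathlib
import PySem

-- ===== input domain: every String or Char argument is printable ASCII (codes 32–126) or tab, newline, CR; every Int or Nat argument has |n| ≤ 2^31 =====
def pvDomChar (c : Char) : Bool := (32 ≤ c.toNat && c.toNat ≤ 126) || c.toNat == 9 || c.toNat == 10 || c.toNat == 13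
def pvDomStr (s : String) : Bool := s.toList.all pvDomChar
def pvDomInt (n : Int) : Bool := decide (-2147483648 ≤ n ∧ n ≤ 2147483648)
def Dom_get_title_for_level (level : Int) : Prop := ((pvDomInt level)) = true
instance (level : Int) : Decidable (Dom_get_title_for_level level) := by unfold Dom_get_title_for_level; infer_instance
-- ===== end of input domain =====

-- B replaces A's scan over reversed (threshold, title) pairs with a closed-form clamped index level // 5 (objective: simpler).

-- ===== PORT A =====
-- the loop 'for lvl, title in reversed(titles): if level >= lvl: return title' as structural recursion;
-- 'reversed(titles)' is transcribed as the reversed list literal (exact: titles is a fixed literal)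
def aScan (level : Int) : List (Int × String) → String
  | [] => "Wanderer"
  | (lvl, title) :: rest => if level ≥ lvl then title else aScan level rest

def get_title_for_level (level : Int) : String :=
  aScan level
    [(50, "Einherjar"), (45, "Dragonlord"), (40, "Archmage"), (35, "Paladin"),
     (30, "Berzerker"), (25, "Spellblade"), (20, "Knight"), (15, "Squire"),
     (10, "Scrub"), (5, "Noob"), (0, "Wanderer")]

-- ===== PORT B =====
def get_title_for_level_alt (level : Int) : String :=
  let names : List String :=
    ["Wanderer", "Noob", "Scrub", "Squire", "Knight", "Spellblade",
     "Berzerker", "Paladin", "Archmage", "Dragonlord", "Einherjar"]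
  let idx : Int := max 0 (min (PySem.Int.floordiv level 5) 10)
  -- names[idx]: idx is clamped into [0,10], so Python indexing never raises; the getD default is unreachable
  (PySem.List.pyGet? names idx).getD "Wanderer"

-- ===== PRECONDITION & SPEC =====
def Spec_get_title_for_level (level : Int) (out : String) : Prop := out = get_title_for_level_alt level
instance (level : Int) (out : String) : Decidable (Spec_get_title_for_level level out) := by unfold Spec_get_title_for_level; infer_instance

-- ===== CLAIM (what is proved, stated in full; the proofs are below) =====
def Claim_equal_get_title_for_level : Prop := ∀ (level : Int), Dom_get_title_for_level level → Spec_get_title_for_level level (get_title_for_level level)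

-- ===== LEMMAS AND PROOFS =====
theorem alt_eval (level k : Int) (title : String)
    (hk : max 0 (min (level / 5) 10) = k)
    (ht : (PySem.List.pyGet? ["Wanderer", "Noob", "Scrub", "Squire", "Knight", "Spellblade",
      "Berzerker", "Paladin", "Archmage", "Dragonlord", "Einherjar"] k).getD "Wanderer" = title) :
    get_title_for_level_alt level = title := by
  simp only [get_title_for_level_alt]
  rw [PySem.Int.floordiv_eq_ediv_of_pos (by norm_num : (0:Int) < 5), hk, ht]

theorem ht0 : (PySem.List.pyGet? ["Wanderer", "Noob", "Scrub", "Squire", "Knight", "Spellblade",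
      "Berzerker", "Paladin", "Archmage", "Dragonlord", "Einherjar"] (0:Int)).getD "Wanderer" = "Wanderer" := rfl
theorem ht1 : (PySem.List.pyGet? ["Wanderer", "Noob", "Scrub", "Squire", "Knight", "Spellblade",
      "Berzerker", "Paladin", "Archmage", "Dragonlord", "Einherjar"] (1:Int)).getD "Wanderer" = "Noob" := rfl
theorem ht2 : (PySem.List.pyGet? ["Wanderer", "Noob", "Scrub", "Squire", "Knight", "Spellblade",
      "Berzerker", "Paladin", "Archmage", "Dragonlord", "Einherjar"] (2:Int)).getD "Wanderer" = "Scrub" := rfl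
theorem ht3 : (PySem.List.pyGet? ["Wanderer", "Noob", "Scrub", "Squire", "Knight", "Spellblade",
      "Berzerker", "Paladin", "Archmage", "Dragonlord", "Einherjar"] (3:Int)).getD "Wanderer" = "Squire" := rfl
theorem ht4 : (PySem.List.pyGet? ["Wanderer", "Noob", "Scrub", "Squire", "Knight", "Spellblade",
      "Berzerker", "Paladin", "Archmage", "Dragonlord", "Einherjar"] (4:Int)).getD "Wanderer" = "Knight" := rfl
theorem ht5 : (PySem.List.pyGet? ["Wanderer", "Noob", "Scrub", "Squire", "Knight", "Spellblade",
      "Berzerker", "Paladin", "Archmage", "Dragonlord", "Einherjar"] (5:Int)).getD "Wanderer" = "Spellblade" := rfl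
theorem ht6 : (PySem.List.pyGet? ["Wanderer", "Noob", "Scrub", "Squire", "Knight", "Spellblade",
      "Berzerker", "Paladin", "Archmage", "Dragonlord", "Einherjar"] (6:Int)).getD "Wanderer" = "Berzerker" := rfl
theorem ht7 : (PySem.List.pyGet? ["Wanderer", "Noob", "Scrub", "Squire", "Knight", "Spellblade",
      "Berzerker", "Paladin", "Archmage", "Dragonlord", "Einherjar"] (7:Int)).getD "Wanderer" = "Paladin" := rfl
theorem ht8 : (PySem.List.pyGet? ["Wanderer", "Noob", "Scrub", "Squire", "Knight", "Spellblade",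
      "Berzerker", "Paladin", "Archmage", "Dragonlord", "Einherjar"] (8:Int)).getD "Wanderer" = "Archmage" := rfl
theorem ht9 : (PySem.List.pyGet? ["Wanderer", "Noob", "Scrub", "Squire", "Knight", "Spellblade",
      "Berzerker", "Paladin", "Archmage", "Dragonlord", "Einherjar"] (9:Int)).getD "Wanderer" = "Dragonlord" := rfl
theorem ht10 : (PySem.List.pyGet? ["Wanderer", "Noob", "Scrub", "Squire", "Knight", "Spellblade",
      "Berzerker", "Paladin", "Archmage", "Dragonlord", "Einherjar"] (10:Int)).getD "Wanderer" = "Einherjar" := rfl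

theorem aChain (level : Int) : get_title_for_level level =
    (if level ≥ 50 then "Einherjar" else if level ≥ 45 then "Dragonlord" else if level ≥ 40 then "Archmage" else if level ≥ 35 then "Paladin" else if level ≥ 30 then "Berzerker" else if level ≥ 25 then "Spellblade" else if level ≥ 20 then "Knight" else if level ≥ 15 then "Squire" else if level ≥ 10 then "Scrub" else if level ≥ 5 then "Noob" else if level ≥ 0 then "Wanderer" else "Wanderer") := by
  simp only [get_title_for_level, aScan]

-- ===== VERDICT (by name: the statement is the Claim_ definition above) =====
set_option maxHeartbeats 1000000 in
theorem get_title_for_level_spec : Claim_equal_get_title_for_level := by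
  intro level _
  unfold Spec_get_title_for_level
  rw [aChain level]
  split_ifs
  · exact (alt_eval level 10 "Einherjar" (by omega) ht10).symm
  · exact (alt_eval level 9 "Dragonlord" (by omega) ht9).symm
  · exact (alt_eval level 8 "Archmage" (by omega) ht8).symm
  · exact (alt_eval level 7 "Paladin" (by omega) ht7).symm
  · exact (alt_eval level 6 "Berzerker" (by omega) ht6).symm
  · exact (alt_eval level 5 "Spellblade" (by omega) ht5).symm
  · exact (alt_eval level 4 "Knight" (by omega) ht4).symm
  · exact (alt_eval level 3 "Squire" (by omega) ht3).symm
  · exact (alt_eval level 2 "Scrub" (by omega) ht2).symm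
  · exact (alt_eval level 1 "Noob" (by omega) ht1).symm
  · exact (alt_eval level 0 "Wanderer" (by omega) ht0).symm
  · exact (alt_eval level 0 "Wanderer" (by omega) ht0).symm
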